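-- pv_equiv track=rewrite | github.com/gabrielfougeron/pyquickbench | pyquickbench/_utils.py | _count_Truthy
-- ===== SOURCE A (Python) =====
-- def _count_Truthy(iterator):
--     count = 0
--     first_true_idx = None
--     for i, val in enumerate(iterator):
--         if val:
--             count+=1
--             if first_true_idx is None:
--                 first_true_idx = i
--     return count, first_true_idx
-- ===== SOURCE B (Python) =====
-- def _count_Truthy(iterator):
--     values = list(iterator)
--     count = sum(1 for v in values if v)
--     first_true_idx = next((i for i, v in enumerate(values) if v), None)
--     return count, first_true_idx
-- ===== Notes on version B (the rewrite author's own statement) =====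
-- stated objective: idiomatic
-- what changed: A's single fused loop threading (count, first_true_idx) state is replaced by materializing the iterator and two independent passes: a sum() over truthy values and next() over enumerate for the first truthy index.
import Mathlib
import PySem

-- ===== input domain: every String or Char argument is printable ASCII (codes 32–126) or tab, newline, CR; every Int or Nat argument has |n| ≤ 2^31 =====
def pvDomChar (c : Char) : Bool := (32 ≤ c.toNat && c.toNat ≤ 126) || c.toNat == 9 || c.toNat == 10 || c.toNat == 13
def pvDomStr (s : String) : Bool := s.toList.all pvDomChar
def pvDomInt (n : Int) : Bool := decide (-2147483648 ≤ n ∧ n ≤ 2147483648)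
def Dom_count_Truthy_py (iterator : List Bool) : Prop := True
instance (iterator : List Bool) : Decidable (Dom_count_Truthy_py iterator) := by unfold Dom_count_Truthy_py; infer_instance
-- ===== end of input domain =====

-- B replaces A's single fused loop over (count, first_true_idx) state with two independent
-- passes over the stored list (a sum-count and a first-index search); objective: idiomatic.


-- ===== PORT A =====
-- A's for-loop over enumerate(iterator), threading (count, first_true_idx).
def countTruthyLoopA (i : Int) (count : Int) (first : Option Int) : List Bool → Int × Option Int
  | [] => (count, first)
  | v :: rest =>
    if v then
      countTruthyLoopA (i + 1) (count + 1) (if first.isNone then some i else first) rest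
    else
      countTruthyLoopA (i + 1) count first rest

def count_Truthy_py (iterator : List Bool) : Int × Option Int :=
  countTruthyLoopA 0 0 none iterator

-- ===== PORT B =====
-- count = sum(1 for v in values if v)
def countTruthySum (values : List Bool) : Int :=
  values.foldl (fun acc v => if v then acc + 1 else acc) 0

-- first_true_idx = next((i for i, v in enumerate(values) if v), None)
def countTruthyFirst (i : Int) : List Bool → Option Int
  | [] => none
  | v :: rest => if v then some i else countTruthyFirst (i + 1) rest

def count_Truthy_py_alt (iterator : List Bool) : Int × Option Int :=
  (countTruthySum iterator, countTruthyFirst 0 iterator)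

-- ===== PRECONDITION & SPEC =====
def Spec_count_Truthy_py (iterator : List Bool) (out : Int × Option Int) : Prop := out = count_Truthy_py_alt iterator
instance (iterator : List Bool) (out : Int × Option Int) : Decidable (Spec_count_Truthy_py iterator out) := by unfold Spec_count_Truthy_py; infer_instance

-- ===== CLAIM (what is proved, stated in full; the proofs are below) =====
def Claim_equal_count_Truthy_py : Prop := ∀ (iterator : List Bool), Dom_count_Truthy_py iterator → Spec_count_Truthy_py iterator (count_Truthy_py iterator)

-- ===== LEMMAS AND PROOFS =====

theorem countTruthySum_foldl_shift (vs : List Bool) (c : Int) :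
    vs.foldl (fun acc v => if v then acc + 1 else acc) c = c + countTruthySum vs := by
  induction vs generalizing c with
  | nil => simp [countTruthySum]
  | cons v rest ih =>
    simp only [countTruthySum, List.foldl_cons]
    split_ifs
    · rw [ih, ih (0 + 1)]; ring
    · rw [ih, ih 0]; ring

theorem countTruthySum_cons_true (rest : List Bool) :
    countTruthySum (true :: rest) = 1 + countTruthySum rest := by
  show List.foldl _ (if true then (0:Int) + 1 else 0) rest = _
  rw [if_pos rfl, countTruthySum_foldl_shift]
  ring

theorem countTruthySum_cons_false (rest : List Bool) :
    countTruthySum (false :: rest) = countTruthySum rest := by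
  simp [countTruthySum]

theorem countTruthyLoopA_eq (vs : List Bool) (i c : Int) (f : Option Int) :
    countTruthyLoopA i c f vs =
      (c + countTruthySum vs, f.or (countTruthyFirst i vs)) := by
  induction vs generalizing i c f with
  | nil => cases f <;> simp [countTruthyLoopA, countTruthySum, countTruthyFirst]
  | cons v rest ih =>
    cases v with
    | false =>
      simp only [countTruthyLoopA, countTruthyFirst, Bool.false_eq_true, if_false]
      rw [ih, countTruthySum_cons_false]
    | true =>
      cases f with
      | none =>
        rw [show countTruthyLoopA i c none (true :: rest)
              = countTruthyLoopA (i + 1) (c + 1) (some i) rest from rfl]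
        rw [show countTruthyFirst i (true :: rest) = some i from rfl]
        rw [ih, countTruthySum_cons_true, Prod.mk.injEq]
        exact ⟨by ring, by simp [Option.or]⟩
      | some j =>
        rw [show countTruthyLoopA i c (some j) (true :: rest)
              = countTruthyLoopA (i + 1) (c + 1) (some j) rest from rfl]
        rw [show countTruthyFirst i (true :: rest) = some i from rfl]
        rw [ih, countTruthySum_cons_true, Prod.mk.injEq]
        exact ⟨by ring, by simp [Option.or]⟩

-- ===== VERDICT (by name: the statement is the Claim_ definition above) =====
theorem count_Truthy_py_spec : Claim_equal_count_Truthy_py := by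
  intro vs _
  unfold Spec_count_Truthy_py count_Truthy_py count_Truthy_py_alt
  rw [countTruthyLoopA_eq]
  simp [Option.or]
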